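-- pv_equiv track=rewrite | github.com/DennieCodes/python-exploration | python-functions/pipe_outputs.py | pipe_outputs
-- ===== SOURCE A (Python) =====
-- def pipe_outputs(num_pipes, steps):
--     pipes = [8 for num in range(num_pipes)] # create a list of pipes with default value of 8
--
--     for step in steps: # iterate over each step
--         if len(step) == 1: # step[0] refers to pipes[step[0]]
--             pos = step[0]-1
--             pipes[pos] = pipes[pos] + pipes[pos+1] # merge value of both pipes
--             pipes.pop(pos+1) # remove pipe to the right
--         elif len(step) == 2: # remember step here has two values so # of pipe is step[0]
--             pos = step[0]-1
--             left_flow = step[1]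
--             current_value = pipes[pos] # get value of pipe
--             pipes[pos] = current_value - left_flow # put remaining difference into current pipe
--             pipes.insert(pos, left_flow) # insert value of step[1] into new list entry
--     return pipes
-- ===== SOURCE B (Python) =====
-- def pipe_outputs(num_pipes, steps):
--     # gap buffer / zipper: the pipe row is kept as two stacks around a cursor.
--     # merge/split are O(1) stack operations at the cursor; each step only pays
--     # for moving the cursor to its position, not a full indexed pop/insert.
--     left = []                # pipes before the cursor, in order (top = nearest)
--     right = [8] * num_pipes  # pipes from the cursor on, reversed (top = pipe at cursor)
--     cursor = 0
--     for step in steps: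
--         if len(step) not in (1, 2):
--             continue
--         p = step[0] - 1
--         if cursor < p:
--             for _ in range(p - cursor):
--                 left.append(right.pop())
--             cursor = p
--         elif cursor > p:
--             for _ in range(cursor - p):
--                 right.append(left.pop())
--             cursor = p
--         if len(step) == 1:
--             a = right.pop()
--             b = right.pop()
--             right.append(a + b)
--         else:
--             f = step[1]
--             a = right.pop()
--             right.append(a - f)
--             right.append(f)
--     return left + right[::-1]
-- ===== Notes on version B (the rewrite author's own statement) =====
-- stated objective: alternative
-- what changed: B replaces A's single mutable list with indexed assignment/pop/insert by a gap buffer (zipper): two stacks around a cursor that is moved incrementally between steps, so merge and split are O(1) stack operations at the cursor and each step only pays cursor travel.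
-- outside the precondition, e.g. on pipe_outputs(2, [[0]]): A returns [16], B raises IndexError
import Mathlib
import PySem

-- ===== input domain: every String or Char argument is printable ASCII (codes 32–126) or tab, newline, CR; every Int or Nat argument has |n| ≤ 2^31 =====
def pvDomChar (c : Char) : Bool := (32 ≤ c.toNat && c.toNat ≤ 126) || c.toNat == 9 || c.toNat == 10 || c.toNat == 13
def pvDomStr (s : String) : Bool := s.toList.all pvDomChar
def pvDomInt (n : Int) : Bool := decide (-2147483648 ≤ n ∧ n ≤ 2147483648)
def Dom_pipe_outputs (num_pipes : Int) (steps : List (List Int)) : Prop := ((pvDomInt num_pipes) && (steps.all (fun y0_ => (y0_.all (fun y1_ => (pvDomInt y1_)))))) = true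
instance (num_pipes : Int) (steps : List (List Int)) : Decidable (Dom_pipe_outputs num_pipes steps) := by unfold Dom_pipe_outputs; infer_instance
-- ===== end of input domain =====

-- B keeps the pipe row as a gap buffer (two stacks around a cursor) with O(1) merge/split at the
-- cursor, instead of A's indexed assignment + pop/insert on one list; objective: alternative.

-- ===== PORT A =====
-- transliteration of A's loop body: indexed assignment, pop, insert on the mutable list;
-- reads/pops that raise IndexError in Python are excluded by Pre_ below.
def pvStepA (pipes : List Int) (step : List Int) : List Int :=
  if step.length = 1 then
    let pos := PySem.List.pyGetD step 0 0 - 1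
    let pipes' := PySem.List.pySetD pipes pos
      (PySem.List.pyGetD pipes pos 0 + PySem.List.pyGetD pipes (pos + 1) 0)
    ((PySem.List.pop? pipes' (pos + 1)).map Prod.snd).getD pipes'
  else if step.length = 2 then
    let pos := PySem.List.pyGetD step 0 0 - 1
    let left_flow := PySem.List.pyGetD step 1 0
    let current_value := PySem.List.pyGetD pipes pos 0
    let pipes' := PySem.List.pySetD pipes pos (current_value - left_flow)
    PySem.List.insert pipes' pos left_flow
  else pipes

def pipe_outputs (num_pipes : Int) (steps : List (List Int)) : List Int :=
  let pipes := (PySem.List.pyRange 0 num_pipes 1).map (fun _ => (8 : Int))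
  steps.foldl pvStepA pipes

-- ===== PORT B =====
-- zipper state (left, right): Python's `left` stack is ported with its top at the HEAD of the
-- Lean list (so Lean left = prefix reversed) and likewise Python's reversed `right` stack has
-- its top (= pipe at the cursor) at the head; each Python append/pop is a cons/uncons here.
def pvMoveR : Nat → List Int × List Int → List Int × List Int
  | 0, st => st
  | Nat.succ k, (l, x :: r) => pvMoveR k (x :: l, r)
  | Nat.succ _, (l, []) => (l, [])   -- unreachable under Pre_ (Python would raise IndexError)

def pvMoveL : Nat → List Int × List Int → List Int × List Int
  | 0, st => st
  | Nat.succ k, (x :: l, r) => pvMoveL k (l, x :: r)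
  | Nat.succ _, ([], r) => ([], r)   -- unreachable under Pre_ (Python would raise IndexError)

def pvStepB (st : List Int × List Int) (step : List Int) : List Int × List Int :=
  if step.length = 1 ∨ step.length = 2 then
    let p := PySem.List.pyGetD step 0 0 - 1
    let c : Int := (st.1.length : Int)   -- cursor = size of the left stack
    let st' := if c < p then pvMoveR (p - c).toNat st
               else if p < c then pvMoveL (c - p).toNat st
               else st
    if step.length = 1 then
      match st' with
      | (l, a :: b :: r) => (l, (a + b) :: r)
      | (l, r) => (l, r)   -- unreachable under Pre_
    else
      let f := PySem.List.pyGetD step 1 0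
      match st' with
      | (l, a :: r) => (l, f :: (a - f) :: r)
      | (l, r) => (l, r)   -- unreachable under Pre_
  else st

def pipe_outputs_alt (num_pipes : Int) (steps : List (List Int)) : List Int :=
  let st := steps.foldl pvStepB ([], List.replicate num_pipes.toNat 8)
  st.1.reverse ++ st.2

-- ===== PRECONDITION & SPEC =====
-- pvStepsOK tracks only the running LENGTH of the pipe list (no pipe values) and requires each
-- step's 1-based pipe number to be in range for that length.
def pvStepsOK (len : Int) (steps : List (List Int)) : Bool :=
  match steps with
  | [] => true
  | s :: rest =>
    match s with
    | [p] => decide (1 ≤ p) && decide (p + 1 ≤ len) && pvStepsOK (len - 1) rest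
    | [p, _] => decide (1 ≤ p) && decide (p ≤ len) && pvStepsOK (len + 1) rest
    | _ => pvStepsOK len rest

-- Pre_ restricts to the task's natural domain: every step names an existing pipe by its 1-based
-- number. On malformed steps (non-positive or too-large pipe numbers) A raises IndexError or
-- returns a value produced by Python's negative-index wraparound, which is no semantics for pipe
-- numbering, so those inputs are excluded rather than mirrored.
def Pre_pipe_outputs (num_pipes : Int) (steps : List (List Int)) : Prop :=
  pvStepsOK (max num_pipes 0) steps = true

instance (num_pipes : Int) (steps : List (List Int)) : Decidable (Pre_pipe_outputs num_pipes steps) := by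
  unfold Pre_pipe_outputs; infer_instance

def pvWitness_pipe_outputs : Int × List (List Int) := (3, [[2], [1, 5]])

def Spec_pipe_outputs (num_pipes : Int) (steps : List (List Int)) (out : List Int) : Prop := out = pipe_outputs_alt num_pipes steps
instance (num_pipes : Int) (steps : List (List Int)) (out : List Int) : Decidable (Spec_pipe_outputs num_pipes steps out) := by unfold Spec_pipe_outputs; infer_instance

-- ===== CLAIM (what is proved, stated in full; the proofs are below) =====
def Claim_equal_pipe_outputs : Prop := ∀ (num_pipes : Int) (steps : List (List Int)), Dom_pipe_outputs num_pipes steps → Pre_pipe_outputs num_pipes steps → Spec_pipe_outputs num_pipes steps (pipe_outputs num_pipes steps)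

-- ===== LEMMAS AND PROOFS =====

lemma pv_init (num_pipes : Int) :
    (PySem.List.pyRange 0 num_pipes 1).map (fun _ => (8 : Int))
      = List.replicate num_pipes.toNat 8 := by
  rw [PySem.List.pyRange_one]
  simp [List.eq_replicate_iff]

lemma pv_eraseIdx_append (l₁ l₂ : List Int) :
    (l₁ ++ l₂).eraseIdx l₁.length = l₁ ++ l₂.tail := by
  rw [List.eraseIdx_eq_take_drop_succ, List.take_left' rfl]
  congr 1
  rw [← List.tail_drop (l := l₁ ++ l₂) (i := l₁.length), List.drop_left]

-- A's merge step in canonical take/cons/drop form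
lemma pvStepA_merge (pipes : List Int) (p : Int) (n : Nat)
    (hn : p - 1 = (n : Int)) (hlen : n + 2 ≤ pipes.length) :
    pvStepA pipes [p]
      = pipes.take n ++ [pipes.getD n 0 + pipes.getD (n + 1) 0] ++ pipes.drop (n + 2) := by
  have hv : PySem.List.pyGetD [p] 0 0 = p := PySem.List.pyGetD_zero_cons _ _ _
  show (if ([p] : List Int).length = 1 then _ else _) = _
  rw [if_pos (show ([p] : List Int).length = 1 from rfl)]
  simp only [hv, hn]
  have hc1 : (n : Int) + 1 = ((n + 1 : Nat) : Int) := by push_cast; ring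
  rw [hc1]
  simp only [PySem.List.pyGetD_natCast, PySem.List.pySetD_natCast]
  have hset : pipes.set n (pipes.getD n 0 + pipes.getD (n + 1) 0)
      = (pipes.take n ++ [pipes.getD n 0 + pipes.getD (n + 1) 0]) ++ pipes.drop (n + 1) := by
    rw [List.set_eq_take_append_cons_drop, if_pos (by omega)]
    simp
  rw [hset, PySem.List.pop?_natCast _ (n + 1) (by
    simp [List.length_take]
    omega)]
  simp only [Option.map_some, Option.getD_some]
  have hfix : (pipes.take n ++ [pipes.getD n 0 + pipes.getD (n + 1) 0]).length = n + 1 := by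
    simp [List.length_take]; omega
  have herase := pv_eraseIdx_append
    (pipes.take n ++ [pipes.getD n 0 + pipes.getD (n + 1) 0]) (pipes.drop (n + 1))
  rw [hfix] at herase
  rw [herase, List.tail_drop]

-- A's split step in canonical form
lemma pvStepA_split (pipes : List Int) (p f : Int) (n : Nat)
    (hn : p - 1 = (n : Int)) (hlen : n + 1 ≤ pipes.length) :
    pvStepA pipes [p, f]
      = pipes.take n ++ [f, pipes.getD n 0 - f] ++ pipes.drop (n + 1) := by
  have hv : PySem.List.pyGetD [p, f] 0 0 = p := PySem.List.pyGetD_zero_cons _ _ _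
  have hf : PySem.List.pyGetD [p, f] 1 0 = f := by
    simp [PySem.List.pyGetD, PySem.List.pyGet?, PySem.List.pyIdx?]
  show (if ([p, f] : List Int).length = 1 then _ else
        if ([p, f] : List Int).length = 2 then _ else _) = _
  rw [if_neg (show ¬ ([p, f] : List Int).length = 1 from by simp),
      if_pos (show ([p, f] : List Int).length = 2 from rfl)]
  simp only [hv, hf, hn]
  simp only [PySem.List.pyGetD_natCast, PySem.List.pySetD_natCast]
  have hset : pipes.set n (pipes.getD n 0 - f)
      = pipes.take n ++ (pipes.getD n 0 - f) :: pipes.drop (n + 1) := by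
    rw [List.set_eq_take_append_cons_drop, if_pos (by omega)]
  rw [hset, PySem.List.insert_natCast _ n f (by simp [List.length_take]; omega)]
  rw [List.take_left' (by simp [List.length_take]; omega),
      List.drop_left' (by simp [List.length_take]; omega)]
  simp

-- the counted cursor moves in closed form
lemma pvMoveR_eq : ∀ (k : Nat) (l r : List Int), k ≤ r.length →
    pvMoveR k (l, r) = ((r.take k).reverse ++ l, r.drop k) := by
  intro k
  induction k with
  | zero => intro l r _; simp [pvMoveR]
  | succ k ih =>
    intro l r hk
    cases r with
    | nil => simp at hk
    | cons x r =>
      simp only [pvMoveR]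
      rw [ih (x :: l) r (by simpa using hk)]
      simp

lemma pvMoveL_eq : ∀ (k : Nat) (l r : List Int), k ≤ l.length →
    pvMoveL k (l, r) = (l.drop k, (l.take k).reverse ++ r) := by
  intro k
  induction k with
  | zero => intro l r _; simp [pvMoveL]
  | succ k ih =>
    intro l r hk
    cases l with
    | nil => simp at hk
    | cons x l =>
      simp only [pvMoveL]
      rw [ih l (x :: r) (by simpa using hk)]
      simp

-- moving the cursor to target t is pure navigation: the represented list is unchanged
lemma pv_move_eq (l r : List Int) (t : Nat) (ht : t ≤ l.length + r.length) :
    (if (l.length : Int) < (t : Int) then pvMoveR ((t : Int) - (l.length : Int)).toNat (l, r)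
     else if (t : Int) < (l.length : Int) then pvMoveL ((l.length : Int) - (t : Int)).toNat (l, r)
     else (l, r))
    = (((l.reverse ++ r).take t).reverse, (l.reverse ++ r).drop t) := by
  by_cases h1 : (l.length : Int) < (t : Int)
  · rw [if_pos h1]
    have hk : ((t : Int) - (l.length : Int)).toNat = t - l.length := by omega
    rw [hk, pvMoveR_eq _ _ _ (by omega)]
    have htake : (l.reverse ++ r).take t = l.reverse ++ r.take (t - l.length) := by
      rw [List.take_append, List.take_of_length_le (by simp; omega), List.length_reverse]
    have hdrop : (l.reverse ++ r).drop t = r.drop (t - l.length) := by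
      rw [List.drop_append, List.drop_eq_nil_of_le (by simp; omega), List.length_reverse,
        List.nil_append]
    rw [htake, hdrop]
    simp
  · rw [if_neg h1]
    by_cases h2 : (t : Int) < (l.length : Int)
    · rw [if_pos h2]
      have hk : ((l.length : Int) - (t : Int)).toNat = l.length - t := by omega
      rw [hk, pvMoveL_eq _ _ _ (by omega)]
      have hz : t - l.reverse.length = 0 := by simp; omega
      have htake : (l.reverse ++ r).take t = l.reverse.take t := by
        rw [List.take_append, hz, List.take_zero, List.append_nil]
      have hdrop : (l.reverse ++ r).drop t = l.reverse.drop t ++ r := by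
        rw [List.drop_append, hz, List.drop_zero]
      rw [htake, hdrop, List.take_reverse, List.drop_reverse]
      simp
    · rw [if_neg h2]
      have ht' : t = l.length := by omega
      subst ht'
      have h3 : List.take l.length l.reverse = l.reverse :=
        List.take_of_length_le (by simp)
      rw [List.take_append, List.drop_append, h3]
      simp

-- B's merge step equals the same canonical form on the represented list
lemma pvStepB_merge (l r : List Int) (p : Int) (n : Nat)
    (hn : p - 1 = (n : Int)) (hlen : n + 2 ≤ l.length + r.length) :
    pvStepB (l, r) [p]
      = (((l.reverse ++ r).take n).reverse,
         ((l.reverse ++ r).getD n 0 + (l.reverse ++ r).getD (n + 1) 0)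
           :: (l.reverse ++ r).drop (n + 2)) := by
  have hv : PySem.List.pyGetD [p] 0 0 = p := PySem.List.pyGetD_zero_cons _ _ _
  have hlenp : n + 2 ≤ (l.reverse ++ r).length := by simp; omega
  have hd : (l.reverse ++ r).drop n
      = (l.reverse ++ r).getD n 0 :: (l.reverse ++ r).getD (n + 1) 0
          :: (l.reverse ++ r).drop (n + 2) := by
    rw [List.drop_eq_getElem_cons (by omega), List.drop_eq_getElem_cons (by omega)]
    rw [List.getD_eq_getElem _ _ (by omega), List.getD_eq_getElem _ _ (by omega)]
  have hg : ([p] : List Int).length = 1 ∨ ([p] : List Int).length = 2 := Or.inl rfl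
  unfold pvStepB
  rw [if_pos hg, if_pos (show ([p] : List Int).length = 1 from rfl)]
  simp only [hv, hn]
  rw [pv_move_eq l r n (by omega)]
  rw [hd]

-- B's split step equals the same canonical form on the represented list
lemma pvStepB_split (l r : List Int) (p f : Int) (n : Nat)
    (hn : p - 1 = (n : Int)) (hlen : n + 1 ≤ l.length + r.length) :
    pvStepB (l, r) [p, f]
      = (((l.reverse ++ r).take n).reverse,
         f :: ((l.reverse ++ r).getD n 0 - f) :: (l.reverse ++ r).drop (n + 1)) := by
  have hv : PySem.List.pyGetD [p, f] 0 0 = p := PySem.List.pyGetD_zero_cons _ _ _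
  have hf : PySem.List.pyGetD [p, f] 1 0 = f := by
    simp [PySem.List.pyGetD, PySem.List.pyGet?, PySem.List.pyIdx?]
  have hlenp : n + 1 ≤ (l.reverse ++ r).length := by simp; omega
  have hd : (l.reverse ++ r).drop n
      = (l.reverse ++ r).getD n 0 :: (l.reverse ++ r).drop (n + 1) := by
    rw [List.drop_eq_getElem_cons (by omega)]
    rw [List.getD_eq_getElem _ _ (by omega)]
  have hg : ([p, f] : List Int).length = 1 ∨ ([p, f] : List Int).length = 2 := Or.inr rfl
  unfold pvStepB
  rw [if_pos hg, if_neg (show ¬ ([p, f] : List Int).length = 1 from by simp)]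
  simp only [hv, hf, hn]
  rw [pv_move_eq l r n (by omega)]
  rw [hd]

-- steps of any other length leave both states unchanged
lemma pv_other_eq (pipes l r : List Int) (s : List Int)
    (h1 : s.length ≠ 1) (h2 : s.length ≠ 2) :
    pvStepA pipes s = pipes ∧ pvStepB (l, r) s = (l, r) := by
  constructor
  · show (if s.length = 1 then _ else if s.length = 2 then _ else _) = _
    rw [if_neg h1, if_neg h2]
  · show (if s.length = 1 ∨ s.length = 2 then _ else _) = _
    rw [if_neg (by tauto)]

-- main invariant: the zipper's represented list tracks A's mutable list step by step
lemma pv_fold (steps : List (List Int)) (l r : List Int)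
    (h : pvStepsOK ((l.length + r.length : Nat) : Int) steps = true) :
    (steps.foldl pvStepB (l, r)).1.reverse ++ (steps.foldl pvStepB (l, r)).2
      = steps.foldl pvStepA (l.reverse ++ r) := by
  induction steps generalizing l r with
  | nil => simp
  | cons s rest ih =>
    match s with
    | [p] =>
      simp only [pvStepsOK, Bool.and_eq_true, decide_eq_true_eq] at h
      obtain ⟨⟨h1, h2⟩, hrest⟩ := h
      obtain ⟨n, hn⟩ : ∃ n : Nat, p - 1 = (n : Int) :=
        ⟨(p - 1).toNat, (Int.toNat_of_nonneg (by omega)).symm⟩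
      have hlen : n + 2 ≤ l.length + r.length := by omega
      have hA := pvStepA_merge (l.reverse ++ r) p n hn (by simp; omega)
      have hB := pvStepB_merge l r p n hn hlen
      simp only [List.foldl_cons, hA, hB]
      have habs : (((l.reverse ++ r).take n).reverse).reverse
          ++ (((l.reverse ++ r).getD n 0 + (l.reverse ++ r).getD (n + 1) 0)
              :: (l.reverse ++ r).drop (n + 2))
          = (l.reverse ++ r).take n
              ++ [(l.reverse ++ r).getD n 0 + (l.reverse ++ r).getD (n + 1) 0]
              ++ (l.reverse ++ r).drop (n + 2) := by
        simp
      rw [← habs]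
      apply ih
      have : ((((l.reverse ++ r).take n).reverse).length : Int)
          + ((((l.reverse ++ r).getD n 0 + (l.reverse ++ r).getD (n + 1) 0)
              :: (l.reverse ++ r).drop (n + 2)).length : Int)
          = ((l.length + r.length : Nat) : Int) - 1 := by
        simp [List.length_take, List.length_drop]
        omega
      push_cast at this ⊢
      rw [this]
      exact hrest
    | [p, f] =>
      simp only [pvStepsOK, Bool.and_eq_true, decide_eq_true_eq] at h
      obtain ⟨⟨h1, h2⟩, hrest⟩ := h
      obtain ⟨n, hn⟩ : ∃ n : Nat, p - 1 = (n : Int) :=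
        ⟨(p - 1).toNat, (Int.toNat_of_nonneg (by omega)).symm⟩
      have hlen : n + 1 ≤ l.length + r.length := by omega
      have hA := pvStepA_split (l.reverse ++ r) p f n hn (by simp; omega)
      have hB := pvStepB_split l r p f n hn hlen
      simp only [List.foldl_cons, hA, hB]
      have habs : (((l.reverse ++ r).take n).reverse).reverse
          ++ (f :: ((l.reverse ++ r).getD n 0 - f) :: (l.reverse ++ r).drop (n + 1))
          = (l.reverse ++ r).take n
              ++ [f, (l.reverse ++ r).getD n 0 - f]
              ++ (l.reverse ++ r).drop (n + 1) := by
        simp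
      rw [← habs]
      apply ih
      have : ((((l.reverse ++ r).take n).reverse).length : Int)
          + ((f :: ((l.reverse ++ r).getD n 0 - f)
              :: (l.reverse ++ r).drop (n + 1)).length : Int)
          = ((l.length + r.length : Nat) : Int) + 1 := by
        simp [List.length_take, List.length_drop]
        omega
      push_cast at this ⊢
      rw [this]
      exact hrest
    | [] =>
      simp only [pvStepsOK] at h
      obtain ⟨ha, hb⟩ := pv_other_eq (l.reverse ++ r) l r [] (by decide) (by decide)
      simp only [List.foldl_cons, ha, hb]
      exact ih l r h
    | a :: b :: c :: t =>
      simp only [pvStepsOK] at h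
      obtain ⟨ha, hb⟩ := pv_other_eq (l.reverse ++ r) l r (a :: b :: c :: t) (by simp) (by simp)
      simp only [List.foldl_cons, ha, hb]
      exact ih l r h

-- ===== VERDICT (by name: the statement is the Claim_ definition above) =====
theorem pipe_outputs_spec : Claim_equal_pipe_outputs := by
  intro num_pipes steps _ hpre
  unfold Spec_pipe_outputs pipe_outputs pipe_outputs_alt
  rw [pv_init]
  have hlen : ((([] : List Int).length
      + (List.replicate num_pipes.toNat (8 : Int)).length : Nat) : Int) = max num_pipes 0 := by
    simp
  have h := pv_fold steps [] (List.replicate num_pipes.toNat 8) (by rw [hlen]; exact hpre)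
  simpa using h.symm
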